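-- pv_equiv track=rewrite | github.com/suh-fee/nyuCoursework | Data Structures Homework/hw/Homework 4.py | appearances
-- ===== SOURCE A (Python) =====
-- def appearances(s, low, high):
--     if low != high:
--         dct = appearances(s, low+1, high)
--         if s[low] in dct:
--             dct[s[low]] += 1
--         else:
--             dct[s[low]] = 1
--     else:
--         dct = {}
--         dct[s[low]] = 1
--     return dct
-- ===== SOURCE B (Python) =====
-- def appearances(s, low, high):
--     dct = {}
--     i = high
--     while True:
--         ch = s[i]
--         dct[ch] = dct.get(ch, 0) + 1
--         if i == low:
--             break
--         i -= 1
--     return dct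
-- ===== Notes on version B (the rewrite author's own statement) =====
-- stated objective: simpler
-- what changed: Replaces the recursion that peels off s[low] with a single iterative loop walking the index from high down to low, updating the count via dct.get(ch, 0) + 1 (same traversal order, so the dict's insertion order is identical).
import Mathlib
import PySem

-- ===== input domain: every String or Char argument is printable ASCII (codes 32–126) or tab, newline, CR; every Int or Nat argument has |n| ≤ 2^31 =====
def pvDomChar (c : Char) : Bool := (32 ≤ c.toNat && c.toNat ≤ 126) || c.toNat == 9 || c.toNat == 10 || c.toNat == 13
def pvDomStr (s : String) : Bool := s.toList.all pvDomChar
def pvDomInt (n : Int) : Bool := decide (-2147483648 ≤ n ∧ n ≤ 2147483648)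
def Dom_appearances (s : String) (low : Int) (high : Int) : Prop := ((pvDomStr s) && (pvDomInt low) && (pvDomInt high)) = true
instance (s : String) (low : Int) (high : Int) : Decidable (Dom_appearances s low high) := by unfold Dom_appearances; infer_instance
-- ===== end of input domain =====

-- B replaces A's recursion (which peels off s[low] and rebuilds the dict on the way back up) by a
-- single iterative loop walking the index from high down to low — the same traversal order, so the
-- dict's insertion order is identical; only the return value is compared.

-- ===== PORT A =====
-- A's recursion, carried out on the dict; the `low < high` test only guards termination
-- (Python recurses forever when low > high — that case is outside Pre_)
def appearancesRecA (s : String) (low : Int) (high : Int) : PySem.Dict String Int :=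
  if low ≠ high then
    if _h : low < high then
      let dct := appearancesRecA s (low + 1) high
      match PySem.Str.pyGet? s low with
      | some c =>
        let k := String.ofList [c]
        if dct.contains k then dct.insert k (dct.getD k 0 + 1)
        else dct.insert k 1
      | none => dct        -- Python raises IndexError here; outside Pre_
    else PySem.Dict.empty  -- Python recurses forever here (low > high); outside Pre_
  else
    match PySem.Str.pyGet? s low with
    | some c => (PySem.Dict.empty : PySem.Dict String Int).insert (String.ofList [c]) 1
    | none => PySem.Dict.empty  -- Python raises IndexError here; outside Pre_
termination_by (high - low).toNat
decreasing_by omega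

def appearances (s : String) (low : Int) (high : Int) : List (String × Int) :=
  (appearancesRecA s low high).items

-- ===== PORT B =====
-- B's 'while True' loop: ch = s[i]; count it; break when i == low; else i -= 1.
-- On Python's IndexError (i out of range) the loop state is returned — outside Pre_.
def appearancesLoopB (s : String) (low : Int) (i : Int) (dct : PySem.Dict String Int) :
    PySem.Dict String Int :=
  match hc : PySem.Str.pyGet? s i with
  | none => dct            -- Python raises IndexError here; outside Pre_
  | some c =>
    let k := String.ofList [c]
    let d' := dct.insert k (dct.getD k 0 + 1)
    if i = low then d'
    else appearancesLoopB s low (i - 1) d'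
termination_by (i + s.toList.length + 1).toNat
decreasing_by
  have hin : PySem.Raise.InRange s.toList.length i := by
    by_contra hni
    have h0 : PySem.List.pyGet? s.toList i = none :=
      (PySem.List.pyGet?_eq_none_iff _ _).mpr hni
    have h1 : PySem.List.pyGet? s.toList i = some c := hc
    rw [h0] at h1
    simp at h1
  unfold PySem.Raise.InRange at hin
  omega

def appearances_alt (s : String) (low : Int) (high : Int) : List (String × Int) :=
  (appearancesLoopB s low high PySem.Dict.empty).items

-- ===== PRECONDITION & SPEC =====
-- A returns normally exactly when low ≤ high and both ends are valid (possibly negative) indices into s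
def Pre_appearances (s : String) (low : Int) (high : Int) : Prop :=
  low ≤ high ∧ PySem.Raise.InRange s.toList.length low ∧ PySem.Raise.InRange s.toList.length high
instance (s : String) (low : Int) (high : Int) : Decidable (Pre_appearances s low high) := by
  unfold Pre_appearances; infer_instance

def pvWitness_appearances : String × Int × Int := ("abcab", 0, 4)

def Spec_appearances (s : String) (low : Int) (high : Int) (out : List (String × Int)) : Prop := out = appearances_alt s low high
instance (s : String) (low : Int) (high : Int) (out : List (String × Int)) : Decidable (Spec_appearances s low high out) := by unfold Spec_appearances; infer_instance

-- ===== CLAIM (what is proved, stated in full; the proofs are below) =====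
def Claim_equal_appearances : Prop := ∀ (s : String) (low : Int) (high : Int), Dom_appearances s low high → Pre_appearances s low high → Spec_appearances s low high (appearances s low high)

-- ===== LEMMAS AND PROOFS =====

-- the unfolding equation of B's loop in the in-range case (its match names the scrutinee proof for termination)
lemma loopB_some (s : String) (low i : Int) (d : PySem.Dict String Int) (c : Char)
    (h : PySem.Str.pyGet? s i = some c) :
    appearancesLoopB s low i d
      = (if i = low then d.insert (String.ofList [c]) (d.getD (String.ofList [c]) 0 + 1)
         else appearancesLoopB s low (i - 1)
                (d.insert (String.ofList [c]) (d.getD (String.ofList [c]) 0 + 1))) := by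
  rw [appearancesLoopB]
  split
  · next heq => rw [h] at heq; simp at heq
  · next c' heq =>
      rw [h] at heq
      injection heq with h2
      subst h2
      rfl

-- A's two-branch update of the dict is B's single unconditional update
lemma step_eq (d : PySem.Dict String Int) (k : String) :
    (if d.contains k then d.insert k (d.getD k 0 + 1) else d.insert k 1)
      = d.insert k (d.getD k 0 + 1) := by
  by_cases h : d.contains k
  · simp [h]
  · simp only [h, Bool.false_eq_true, if_false]
    rw [PySem.Dict.getD_of_not_contains]
    · norm_num
    · simp only [Bool.not_eq_true] at h
      exact h

-- a valid index has a character
lemma get_some (s : String) (i : Int) (h : PySem.Raise.InRange s.toList.length i) :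
    ∃ c, PySem.Str.pyGet? s i = some c := by
  cases hc : PySem.Str.pyGet? s i with
  | some c => exact ⟨c, rfl⟩
  | none =>
    exfalso
    exact (PySem.List.pyGet?_eq_none_iff (xs := s.toList) (i := i)).mp (by simpa using hc) h

-- B's loop processes index `low` LAST: peeling that final step off the loop gives A's recursive step
lemma loopB_peel_low (s : String) :
    ∀ (n : Nat) (low i : Int) (c : Char) (d : PySem.Dict String Int),
    (i - low).toNat = n → low < i →
    PySem.Raise.InRange s.toList.length low → PySem.Raise.InRange s.toList.length i →
    PySem.Str.pyGet? s low = some c →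
    appearancesLoopB s low i d
      = (appearancesLoopB s (low + 1) i d).insert (String.ofList [c])
          ((appearancesLoopB s (low + 1) i d).getD (String.ofList [c]) 0 + 1) := by
  intro n
  induction n with
  | zero => intro low i c d hn hlt _ _ _; omega
  | succ m ih =>
    intro low i c d hn hlt hlow hi hc
    obtain ⟨ci, hci⟩ := get_some s i hi
    rw [loopB_some s low i d ci hci, loopB_some s (low + 1) i d ci hci]
    by_cases hil : i = low + 1
    · -- the loop's last two iterations: process i = low+1, then process low and break
      subst hil
      simp only [if_true, eq_self_iff_true, if_neg (by omega : ¬ low + 1 = low),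
        (by omega : low + 1 - 1 = low)]
      rw [loopB_some s low low _ c hc]
      simp
    · simp only [if_neg (by omega : ¬ i = low), if_neg hil]
      have hi' : PySem.Raise.InRange s.toList.length (i - 1) := by
        unfold PySem.Raise.InRange at *; omega
      exact ih low (i - 1) c _ (by omega) (by omega) hlow hi' hc

-- the main invariant: A's recursion equals B's loop started at i = high on the empty dict
lemma recA_eq_loopB (s : String) :
    ∀ (n : Nat) (low high : Int), (high - low).toNat = n → low ≤ high →
    PySem.Raise.InRange s.toList.length low → PySem.Raise.InRange s.toList.length high →
    appearancesRecA s low high = appearancesLoopB s low high PySem.Dict.empty := by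
  intro n
  induction n with
  | zero =>
    intro low high hn hle hlow _
    have heq : low = high := by omega
    subst heq
    obtain ⟨c, hc⟩ := get_some s low hlow
    rw [appearancesRecA, loopB_some s low low _ c hc]
    simp only [if_neg (by omega : ¬ low ≠ low), hc, if_true, eq_self_iff_true,
      PySem.Dict.getD_empty]
    norm_num
  | succ m ih =>
    intro low high hn hle hlow hhigh
    have hlt : low < high := by omega
    obtain ⟨c, hc⟩ := get_some s low hlow
    have hlow' : PySem.Raise.InRange s.toList.length (low + 1) := by
      unfold PySem.Raise.InRange at *; omega
    rw [appearancesRecA]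
    simp only [if_pos (by omega : low ≠ high), dif_pos hlt, hc,
      ih (low + 1) high (by omega) (by omega) hlow' hhigh]
    rw [loopB_peel_low s (high - low).toNat low high c _ rfl hlt hlow hhigh hc]
    exact step_eq _ _

-- ===== VERDICT (by name: the statement is the Claim_ definition above) =====
theorem appearances_spec : Claim_equal_appearances := by
  intro s low high _hdom hpre
  obtain ⟨hle, hlo, hhi⟩ := hpre
  unfold Spec_appearances appearances appearances_alt
  rw [recA_eq_loopB s (high - low).toNat low high rfl hle hlo hhi]
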